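-- pv_equiv track=rewrite | github.com/viniciusjorgepereira/turing-machine-emulator | turing_machine_structured.py | get_estados
-- ===== SOURCE A (Python) =====
-- def get_estados(comandos):
--     estados = {}
--
--     for com in comandos:
--         estados[com[0]] = {}
--
--     for com in comandos:
--         estados[com[0]]['mov'] = {}
--
--     for com in comandos:
--         estados[com[0]]['mov'][com[1]] = {}
--
--     for com in comandos:
--         estados[com[0]]['mov'][com[1]][com[2]] = {com[3]: com[4]}
--
--     return estados
-- ===== SOURCE B (Python) =====
-- def get_estados(comandos):
--     estados = {}
--     for com in comandos:
--         estados.setdefault(com[0], {}).setdefault('mov', {}).setdefault(com[1], {})[com[2]] = {com[3]: com[4]}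
--     return estados
-- ===== Notes on version B (the rewrite author's own statement) =====
-- stated objective: simpler
-- what changed: Replaces A's four sequential passes (one pass per nesting level) with a single pass that builds each command's whole nested path at once via a setdefault chain.
import Mathlib
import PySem

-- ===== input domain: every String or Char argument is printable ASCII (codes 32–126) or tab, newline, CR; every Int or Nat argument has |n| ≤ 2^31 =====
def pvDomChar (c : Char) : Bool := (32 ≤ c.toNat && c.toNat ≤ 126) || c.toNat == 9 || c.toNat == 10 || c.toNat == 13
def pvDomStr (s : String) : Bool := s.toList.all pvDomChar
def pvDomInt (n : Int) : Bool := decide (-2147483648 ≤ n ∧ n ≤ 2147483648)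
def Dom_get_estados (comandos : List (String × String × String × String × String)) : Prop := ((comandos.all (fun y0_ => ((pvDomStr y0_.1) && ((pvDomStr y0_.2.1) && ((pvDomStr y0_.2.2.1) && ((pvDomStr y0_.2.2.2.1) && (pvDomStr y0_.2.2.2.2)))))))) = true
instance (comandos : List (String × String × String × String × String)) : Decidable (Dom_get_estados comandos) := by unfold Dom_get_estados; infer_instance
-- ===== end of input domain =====

-- B builds the nested state dict in ONE pass with a setdefault chain instead of A's four
-- sequential passes (one pass per nesting level); same return value, simpler shape.

-- Both ports compute the Python dict as a nested PySem.Dict and return its items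
-- (the association-list form of the type convention) via this shared conversion.
def pvItemsOut (d : PySem.Dict String (PySem.Dict String (PySem.Dict String (PySem.Dict String (PySem.Dict String String))))) :
    List (String × List (String × List (String × List (String × List (String × String))))) :=
  d.items.map (fun p1 => (p1.1, p1.2.items.map (fun p2 => (p2.1, p2.2.items.map (fun p3 =>
    (p3.1, p3.2.items.map (fun p4 => (p4.1, p4.2.items))))))))

-- ===== PORT A =====
-- Four passes over comandos, one per nesting level, exactly as in the Python.
-- A Python subscript write 'd[k][…] = v' is ported as PySem.Dict.modify k empty …;
-- the default is never consulted (the previous pass created the key) so this is exact.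
def get_estados (comandos : List (String × String × String × String × String)) : List (String × List (String × List (String × List (String × List (String × String))))) :=
  let e1 := comandos.foldl (fun d com => d.insert com.1 PySem.Dict.empty) PySem.Dict.empty
  let e2 := comandos.foldl (fun d com => d.modify com.1 PySem.Dict.empty
    (fun m => m.insert "mov" PySem.Dict.empty)) e1
  let e3 := comandos.foldl (fun d com => d.modify com.1 PySem.Dict.empty
    (fun m => m.modify "mov" PySem.Dict.empty
      (fun mv => mv.insert com.2.1 PySem.Dict.empty))) e2
  let e4 := comandos.foldl (fun d com => d.modify com.1 PySem.Dict.empty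
    (fun m => m.modify "mov" PySem.Dict.empty
      (fun mv => mv.modify com.2.1 PySem.Dict.empty
        (fun t => t.insert com.2.2.1 (PySem.Dict.ofList [(com.2.2.2.1, com.2.2.2.2)]))))) e3
  pvItemsOut e4

-- ===== PORT B =====
-- One pass; Python's setdefault(k, {}) reads the stored value (getD k empty) and the
-- in-place mutation is written back with insert, which keeps an existing key's position
-- and appends a new one — exactly setdefault's behaviour on the dict.
def get_estados_alt (comandos : List (String × String × String × String × String)) : List (String × List (String × List (String × List (String × List (String × String))))) :=
  let estados := comandos.foldl (fun d com =>
    let m := d.getD com.1 PySem.Dict.empty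
    let mv := m.getD "mov" PySem.Dict.empty
    let t := mv.getD com.2.1 PySem.Dict.empty
    d.insert com.1 (m.insert "mov" (mv.insert com.2.1
      (t.insert com.2.2.1 (PySem.Dict.ofList [(com.2.2.2.1, com.2.2.2.2)]))))) PySem.Dict.empty
  pvItemsOut estados

-- ===== PRECONDITION & SPEC =====
def Spec_get_estados (comandos : List (String × String × String × String × String)) (out : List (String × List (String × List (String × List (String × List (String × String)))))) : Prop := out = get_estados_alt comandos
instance (comandos : List (String × String × String × String × String)) (out : List (String × List (String × List (String × List (String × List (String × String)))))) : Decidable (Spec_get_estados comandos out) := by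
  unfold Spec_get_estados
  letI : DecidableEq (String × List (String × List (String × String))) := inferInstance
  letI : DecidableEq (String × List (String × List (String × List (String × String)))) := inferInstance
  letI : DecidableEq (String × List (String × List (String × List (String × List (String × String))))) := inferInstance
  infer_instance

-- ===== CLAIM (what is proved, stated in full; the proofs are below) =====
def Claim_equal_get_estados : Prop := ∀ (comandos : List (String × String × String × String × String)), Dom_get_estados comandos → Spec_get_estados comandos (get_estados comandos)

-- ===== LEMMAS AND PROOFS =====

-- Short names for the per-level value functions of the two loops (proof-side only).
abbrev PvCmd := String × String × String × String × String
abbrev PvT5 := PySem.Dict String String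
abbrev PvT4 := PySem.Dict String PvT5
abbrev PvT3 := PySem.Dict String PvT4
abbrev PvT2 := PySem.Dict String PvT3

def pvH4 (c : PvCmd) (t : PvT4) : PvT4 :=
  t.insert c.2.2.1 (PySem.Dict.ofList [(c.2.2.2.1, c.2.2.2.2)])
def pvG4 (c : PvCmd) (mv : PvT3) : PvT3 := mv.modify c.2.1 PySem.Dict.empty (pvH4 c)
def pvF4 (c : PvCmd) (m : PvT2) : PvT2 := m.modify "mov" PySem.Dict.empty (pvG4 c)
def pvF3 (c : PvCmd) (m : PvT2) : PvT2 :=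
  m.modify "mov" PySem.Dict.empty (fun mv => mv.insert c.2.1 PySem.Dict.empty)
def pvF2 (_ : PvCmd) (m : PvT2) : PvT2 := m.insert "mov" PySem.Dict.empty

-- getD of a keyed modify-loop: only the commands whose key hits k act, in order, on d.getD k e.
lemma pv_getD_foldl_modify {β ν : Type} (key : β → String) (f : β → ν → ν) (e : ν)
    (k : String) (xs : List β) (d : PySem.Dict String ν) :
    (xs.foldl (fun d c => d.modify (key c) e (f c)) d).getD k e
      = (xs.filter (fun c => key c == k)).foldl (fun v c => f c v) (d.getD k e) := by
  induction xs generalizing d with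
  | nil => rfl
  | cons c cs ih =>
    simp only [List.foldl_cons, List.filter_cons]
    rw [ih]
    by_cases h : key c = k
    · simp [h]
    · have hb : (key c == k) = false := by simp [h]
      simp [hb, PySem.Dict.getD_modify, Ne.symm h]

-- getD of a keyed loop that inserts the constant value v: stays v.
lemma pv_getD_foldl_insert_const {β ν : Type} (key : β → String) (v : ν)
    (xs : List β) (d : PySem.Dict String ν) (k : String) (h : d.getD k v = v) :
    (xs.foldl (fun d c => d.insert (key c) v) d).getD k v = v := by
  induction xs generalizing d with
  | nil => exact h
  | cons c cs ih =>
    simp only [List.foldl_cons]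
    exact ih _ (by rw [PySem.Dict.getD_insert]; split_ifs <;> simp [h])

-- updating a set with elements it already has changes nothing
lemma pv_set_update_self {α : Type} [BEq α] [LawfulBEq α] (s : PySem.Set α) (l : List α)
    (h : ∀ x ∈ l, x ∈ s) : s.update l = s := by
  rw [PySem.Set.update_eq_append_filter]
  have : (PySem.Set.ofList l).filter (fun y => !s.contains y) = [] := by
    rw [List.filter_eq_nil_iff]
    intro y hy
    have hmem : y ∈ s := h y ((PySem.Set.mem_ofList l y).mp hy)
    simpa using hmem
  rw [this, List.append_nil]

lemma pv_update_ofList_self {α : Type} [BEq α] [LawfulBEq α] (l : List α) :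
    (PySem.Set.ofList l).update l = PySem.Set.ofList l :=
  pv_set_update_self _ _ (fun _ hx => (PySem.Set.mem_ofList l _).mpr hx)

-- two String-keyed dicts with Nodup keys are equal iff keys and per-key getD agree
lemma pv_dict_eq {ν : Type} (dflt : ν) (d d' : PySem.Dict String ν)
    (h1 : d.keys.Nodup) (h2 : d'.keys.Nodup) (hk : d.keys = d'.keys)
    (hv : ∀ k ∈ d.keys, d.getD k dflt = d'.getD k dflt) : d = d' := by
  apply PySem.Dict.ext
  rw [PySem.Dict.items_eq_map_keys d h1 dflt, PySem.Dict.items_eq_map_keys d' h2 dflt, ← hk]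
  exact List.map_congr_left (fun k hkm => by rw [hv k hkm])

-- Level 3 (the dict under 'mov'): pre-seeding the r-keys with empty dicts is absorbed.
lemma pv_lvl3 (ys : List PvCmd) :
    ys.foldl (fun mv c => pvG4 c mv)
      (ys.foldl (fun mv c => mv.insert c.2.1 PySem.Dict.empty) PySem.Dict.empty)
    = ys.foldl (fun mv c => pvG4 c mv) PySem.Dict.empty := by
  simp only [pvG4]
  apply pv_dict_eq PySem.Dict.empty
  · exact PySem.Dict.nodup_keys_foldl_modify_key ys (fun c => c.2.1) _ (fun _ c => pvH4 c) _
      (PySem.Dict.nodup_keys_foldl_insert_key ys (fun c => c.2.1) (fun _ _ => PySem.Dict.empty) _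
        (by rw [PySem.Dict.keys_empty]; exact List.nodup_nil))
  · exact PySem.Dict.nodup_keys_foldl_modify_key ys (fun c => c.2.1) _ (fun _ c => pvH4 c) _
      (by rw [PySem.Dict.keys_empty]; exact List.nodup_nil)
  · rw [PySem.Dict.keys_foldl_modify_key ys (fun c => c.2.1) PySem.Dict.empty (fun _ c => pvH4 c),
        PySem.Dict.keys_foldl_modify_key ys (fun c => c.2.1) PySem.Dict.empty (fun _ c => pvH4 c),
        PySem.Dict.keys_foldl_insert_key ys (fun c => c.2.1) (fun _ _ => PySem.Dict.empty),
        PySem.Dict.keys_empty, PySem.Set.update_nil_left]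
    exact pv_update_ofList_self _
  · intro r _
    rw [pv_getD_foldl_modify (fun c => c.2.1) pvH4 PySem.Dict.empty r ys,
        pv_getD_foldl_modify (fun c => c.2.1) pvH4 PySem.Dict.empty r ys,
        pv_getD_foldl_insert_const (fun c => c.2.1) PySem.Dict.empty ys PySem.Dict.empty r
          (PySem.Dict.getD_empty r _),
        PySem.Dict.getD_empty]

-- Level 1 (the value of one state): the three pre-passes are absorbed by the main pass.
lemma pv_lvl1 (ys : List PvCmd) :
    ys.foldl (fun m c => pvF4 c m)
      (ys.foldl (fun m c => pvF3 c m) (ys.foldl (fun m c => pvF2 c m) PySem.Dict.empty))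
    = ys.foldl (fun m c => pvF4 c m) PySem.Dict.empty := by
  simp only [pvF4, pvF3, pvF2]
  apply pv_dict_eq PySem.Dict.empty
  · exact PySem.Dict.nodup_keys_foldl_modify_key ys (fun _ => "mov") _ (fun _ c => pvG4 c) _
      (PySem.Dict.nodup_keys_foldl_modify_key ys (fun _ => "mov") _
        (fun _ c mv => mv.insert c.2.1 PySem.Dict.empty) _
        (PySem.Dict.nodup_keys_foldl_insert_key ys (fun _ => "mov") (fun _ _ => PySem.Dict.empty) _
          (by rw [PySem.Dict.keys_empty]; exact List.nodup_nil)))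
  · exact PySem.Dict.nodup_keys_foldl_modify_key ys (fun _ => "mov") _ (fun _ c => pvG4 c) _
      (by rw [PySem.Dict.keys_empty]; exact List.nodup_nil)
  · rw [PySem.Dict.keys_foldl_modify_key ys (fun _ => "mov") PySem.Dict.empty (fun _ c => pvG4 c),
        PySem.Dict.keys_foldl_modify_key ys (fun _ => "mov") PySem.Dict.empty
          (fun _ c mv => mv.insert c.2.1 PySem.Dict.empty),
        PySem.Dict.keys_foldl_insert_key ys (fun _ => "mov") (fun _ _ => PySem.Dict.empty),
        PySem.Dict.keys_foldl_modify_key ys (fun _ => "mov") PySem.Dict.empty (fun _ c => pvG4 c),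
        PySem.Dict.keys_empty, PySem.Set.update_nil_left,
        pv_update_ofList_self, pv_update_ofList_self]
  · intro k hk
    rw [PySem.Dict.keys_foldl_modify_key ys (fun _ => "mov") PySem.Dict.empty (fun _ c => pvG4 c),
        PySem.Dict.keys_foldl_modify_key ys (fun _ => "mov") PySem.Dict.empty
          (fun _ c mv => mv.insert c.2.1 PySem.Dict.empty),
        PySem.Dict.keys_foldl_insert_key ys (fun _ => "mov") (fun _ _ => PySem.Dict.empty),
        PySem.Dict.keys_empty, PySem.Set.update_nil_left,
        pv_update_ofList_self, pv_update_ofList_self] at hk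
    obtain ⟨c, -, rfl⟩ := List.mem_map.mp ((PySem.Set.mem_ofList _ _).mp hk)
    rw [pv_getD_foldl_modify (fun _ => "mov") pvG4 PySem.Dict.empty "mov" ys,
        pv_getD_foldl_modify (fun _ => "mov") pvG4 PySem.Dict.empty "mov" ys,
        pv_getD_foldl_modify (fun _ => "mov") (fun c mv => mv.insert c.2.1 PySem.Dict.empty)
          PySem.Dict.empty "mov" ys,
        pv_getD_foldl_insert_const (fun _ => "mov") PySem.Dict.empty ys PySem.Dict.empty "mov"
          (PySem.Dict.getD_empty _ _),
        PySem.Dict.getD_empty]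
    have hf : ys.filter (fun _ => ("mov" : String) == "mov") = ys := by simp
    rw [hf]
    exact pv_lvl3 ys

-- Top level: A's four passes produce the same nested dict as B's single pass.
lemma pv_top (xs : List PvCmd) :
    xs.foldl (fun d c => d.modify c.1 PySem.Dict.empty (pvF4 c))
      (xs.foldl (fun d c => d.modify c.1 PySem.Dict.empty (pvF3 c))
        (xs.foldl (fun d c => d.modify c.1 PySem.Dict.empty (pvF2 c))
          (xs.foldl (fun d c => d.insert c.1 PySem.Dict.empty) PySem.Dict.empty)))
    = xs.foldl (fun d c => d.modify c.1 PySem.Dict.empty (pvF4 c)) PySem.Dict.empty := by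
  apply pv_dict_eq PySem.Dict.empty
  · exact PySem.Dict.nodup_keys_foldl_modify_key xs (fun c => c.1) _ (fun _ c => pvF4 c) _
      (PySem.Dict.nodup_keys_foldl_modify_key xs (fun c => c.1) _ (fun _ c => pvF3 c) _
        (PySem.Dict.nodup_keys_foldl_modify_key xs (fun c => c.1) _ (fun _ c => pvF2 c) _
          (PySem.Dict.nodup_keys_foldl_insert_key xs (fun c => c.1) (fun _ _ => PySem.Dict.empty) _
            (by rw [PySem.Dict.keys_empty]; exact List.nodup_nil))))
  · exact PySem.Dict.nodup_keys_foldl_modify_key xs (fun c => c.1) _ (fun _ c => pvF4 c) _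
      (by rw [PySem.Dict.keys_empty]; exact List.nodup_nil)
  · rw [PySem.Dict.keys_foldl_modify_key xs (fun c => c.1) PySem.Dict.empty (fun _ c => pvF4 c),
        PySem.Dict.keys_foldl_modify_key xs (fun c => c.1) PySem.Dict.empty (fun _ c => pvF3 c),
        PySem.Dict.keys_foldl_modify_key xs (fun c => c.1) PySem.Dict.empty (fun _ c => pvF2 c),
        PySem.Dict.keys_foldl_insert_key xs (fun c => c.1) (fun _ _ => PySem.Dict.empty),
        PySem.Dict.keys_foldl_modify_key xs (fun c => c.1) PySem.Dict.empty (fun _ c => pvF4 c),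
        PySem.Dict.keys_empty, PySem.Set.update_nil_left,
        pv_update_ofList_self, pv_update_ofList_self, pv_update_ofList_self]
  · intro k _
    rw [pv_getD_foldl_modify (fun c => c.1) pvF4 PySem.Dict.empty k xs,
        pv_getD_foldl_modify (fun c => c.1) pvF4 PySem.Dict.empty k xs,
        pv_getD_foldl_modify (fun c => c.1) pvF3 PySem.Dict.empty k xs,
        pv_getD_foldl_modify (fun c => c.1) pvF2 PySem.Dict.empty k xs,
        pv_getD_foldl_insert_const (fun c => c.1) PySem.Dict.empty xs PySem.Dict.empty k
          (PySem.Dict.getD_empty k _),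
        PySem.Dict.getD_empty]
    exact pv_lvl1 _

-- ===== VERDICT (by name: the statement is the Claim_ definition above) =====
theorem get_estados_spec : Claim_equal_get_estados := by
  intro comandos _
  show get_estados comandos = get_estados_alt comandos
  exact congrArg pvItemsOut (pv_top comandos)
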